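-- pv_equiv track=rewrite | github.com/alok/tax-avoidance-skill | .agents/skills/tax-avoidance/scripts/tax_flow_common.py | categorize_expense_vendor
-- ===== SOURCE A (Python) =====
-- def categorize_expense_vendor(vendor: str | None) -> str:
--     if not vendor:
--         return "Uncategorized"
--     normalized = vendor.lower()
--     if any(token in normalized for token in ("anthropic", "openai", "hugging face")):
--         return "AI tools"
--     if any(token in normalized for token in ("github", "warp", "linear", "exafunction", "windsurf")):
--         return "Developer tools"
--     if "zoom" in normalized:
--         return "Collaboration"
--     if any(token in normalized for token in ("delta", "united", "alaska airlines")):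
--         return "Travel"
--     return "Uncategorized"
-- ===== SOURCE B (Python) =====
-- TOKEN_PRIORITY = {
--     "anthropic": 0, "openai": 0, "hugging face": 0,
--     "github": 1, "warp": 1, "linear": 1, "exafunction": 1, "windsurf": 1,
--     "zoom": 2,
--     "delta": 3, "united": 3, "alaska airlines": 3,
-- }
-- CATEGORIES = ("AI tools", "Developer tools", "Collaboration", "Travel")
--
--
-- def categorize_expense_vendor(vendor):
--     if not vendor:
--         return "Uncategorized"
--     normalized = vendor.lower()
--     hits = [p for tok, p in TOKEN_PRIORITY.items() if tok in normalized]
--     return CATEGORIES[min(hits)] if hits else "Uncategorized"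
-- ===== Notes on version B (the rewrite author's own statement) =====
-- stated objective: alternative
-- what changed: Instead of an early-return chain of grouped any() checks, B flattens all keywords into one token-to-priority map, collects the priorities of ALL matching tokens in a single comprehension, and returns the category at the minimum matched priority (min-selection over a full scan instead of first-match short-circuiting).
import Mathlib
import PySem

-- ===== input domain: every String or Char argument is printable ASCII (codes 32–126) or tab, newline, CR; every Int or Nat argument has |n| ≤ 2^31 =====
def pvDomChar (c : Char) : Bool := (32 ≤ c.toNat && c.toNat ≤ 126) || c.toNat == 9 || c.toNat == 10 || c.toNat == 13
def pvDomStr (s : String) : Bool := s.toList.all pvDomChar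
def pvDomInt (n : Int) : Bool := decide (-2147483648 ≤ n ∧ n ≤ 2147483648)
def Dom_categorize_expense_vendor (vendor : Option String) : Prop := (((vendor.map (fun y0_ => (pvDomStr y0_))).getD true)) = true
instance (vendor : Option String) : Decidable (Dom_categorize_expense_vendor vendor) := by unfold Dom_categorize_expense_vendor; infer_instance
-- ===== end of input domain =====

-- B flattens the grouped if-chain into one token→priority map, collects the priorities of
-- ALL matching tokens and returns the category at the minimum matched priority; objective: alternative.

-- ===== PORT A =====
def categorize_expense_vendor (vendor : Option String) : String :=
  match vendor with
  | none => "Uncategorized"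
  | some v =>
    if v = "" then "Uncategorized"
    else
      let normalized := PySem.Str.lower v
      if (["anthropic", "openai", "hugging face"].any fun token => PySem.Str.isIn token normalized) then
        "AI tools"
      else if (["github", "warp", "linear", "exafunction", "windsurf"].any fun token => PySem.Str.isIn token normalized) then
        "Developer tools"
      else if PySem.Str.isIn "zoom" normalized then
        "Collaboration"
      else if (["delta", "united", "alaska airlines"].any fun token => PySem.Str.isIn token normalized) then
        "Travel"
      else
        "Uncategorized"

-- ===== PORT B =====
def pvTokenPriority : List (String × Nat) :=
  [("anthropic", 0), ("openai", 0), ("hugging face", 0),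
   ("github", 1), ("warp", 1), ("linear", 1), ("exafunction", 1), ("windsurf", 1),
   ("zoom", 2),
   ("delta", 3), ("united", 3), ("alaska airlines", 3)]

def pvCategories : List String := ["AI tools", "Developer tools", "Collaboration", "Travel"]

def categorize_expense_vendor_alt (vendor : Option String) : String :=
  match vendor with
  | none => "Uncategorized"
  | some v =>
    if v = "" then "Uncategorized"
    else
      let normalized := PySem.Str.lower v
      let hits := pvTokenPriority.filterMap
        (fun tp => if PySem.Str.isIn tp.1 normalized then some tp.2 else none)
      match PySem.List.min? hits (fun x => x) with
      | some m => pvCategories.getD m "Uncategorized"  -- priorities are 0..3, always in range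
      | none => "Uncategorized"

-- ===== PRECONDITION & SPEC =====
def Spec_categorize_expense_vendor (vendor : Option String) (out : String) : Prop := out = categorize_expense_vendor_alt vendor
instance (vendor : Option String) (out : String) : Decidable (Spec_categorize_expense_vendor vendor out) := by unfold Spec_categorize_expense_vendor; infer_instance

-- ===== CLAIM (what is proved, stated in full; the proofs are below) =====
def Claim_equal_categorize_expense_vendor : Prop := ∀ (vendor : Option String), Dom_categorize_expense_vendor vendor → Spec_categorize_expense_vendor vendor (categorize_expense_vendor vendor)

-- ===== LEMMAS AND PROOFS =====

-- B's min-priority selection agrees with A's first-match chain, for any normalized string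
theorem alt_body_eq_chain (n : String) :
    (match PySem.List.min? (pvTokenPriority.filterMap
        (fun tp => if PySem.Str.isIn tp.1 n then some tp.2 else none)) (fun x => x) with
     | some m => pvCategories.getD m "Uncategorized"
     | none => "Uncategorized")
    = (if (["anthropic", "openai", "hugging face"].any fun token => PySem.Str.isIn token n) then "AI tools"
       else if (["github", "warp", "linear", "exafunction", "windsurf"].any fun token => PySem.Str.isIn token n) then "Developer tools"
       else if PySem.Str.isIn "zoom" n then "Collaboration"
       else if (["delta", "united", "alaska airlines"].any fun token => PySem.Str.isIn token n) then "Travel"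
       else "Uncategorized") := by
  set hits : List Nat := pvTokenPriority.filterMap
      (fun tp => if PySem.Str.isIn tp.1 n then some tp.2 else none) with hhits
  -- every matched token contributes its priority to hits
  have mem_tok : ∀ t p, (t, p) ∈ pvTokenPriority → PySem.Str.isIn t n = true → p ∈ hits := by
    intro t p h1 h2
    exact List.mem_filterMap.mpr ⟨(t, p), h1, by rw [if_pos h2]⟩
  -- conversely, every element of hits comes from some matched token
  have hfwd : ∀ m : Nat, m ∈ hits →
      ((PySem.Str.isIn "anthropic" n = true ∨ PySem.Str.isIn "openai" n = true ∨ PySem.Str.isIn "hugging face" n = true) ∧ m = 0)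
      ∨ ((PySem.Str.isIn "github" n = true ∨ PySem.Str.isIn "warp" n = true ∨ PySem.Str.isIn "linear" n = true ∨ PySem.Str.isIn "exafunction" n = true ∨ PySem.Str.isIn "windsurf" n = true) ∧ m = 1)
      ∨ (PySem.Str.isIn "zoom" n = true ∧ m = 2)
      ∨ ((PySem.Str.isIn "delta" n = true ∨ PySem.Str.isIn "united" n = true ∨ PySem.Str.isIn "alaska airlines" n = true) ∧ m = 3) := by
    intro m hmm
    rcases List.mem_filterMap.mp hmm with ⟨⟨t, p⟩, htp, hf⟩
    simp only [ite_eq_iff, Option.some.injEq, reduceCtorEq, and_false, or_false] at hf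
    obtain ⟨hc, rfl⟩ := hf
    simp only [pvTokenPriority, List.mem_cons, List.not_mem_nil, or_false, Prod.mk.injEq] at htp
    rcases htp with ⟨rfl, rfl⟩ | ⟨rfl, rfl⟩ | ⟨rfl, rfl⟩ | ⟨rfl, rfl⟩ | ⟨rfl, rfl⟩ | ⟨rfl, rfl⟩ | ⟨rfl, rfl⟩ | ⟨rfl, rfl⟩ | ⟨rfl, rfl⟩ | ⟨rfl, rfl⟩ | ⟨rfl, rfl⟩ | ⟨rfl, rfl⟩
    · exact Or.inl ⟨Or.inl hc, rfl⟩
    · exact Or.inl ⟨Or.inr (Or.inl hc), rfl⟩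
    · exact Or.inl ⟨Or.inr (Or.inr hc), rfl⟩
    · exact Or.inr (Or.inl ⟨Or.inl hc, rfl⟩)
    · exact Or.inr (Or.inl ⟨Or.inr (Or.inl hc), rfl⟩)
    · exact Or.inr (Or.inl ⟨Or.inr (Or.inr (Or.inl hc)), rfl⟩)
    · exact Or.inr (Or.inl ⟨Or.inr (Or.inr (Or.inr (Or.inl hc))), rfl⟩)
    · exact Or.inr (Or.inl ⟨Or.inr (Or.inr (Or.inr (Or.inr hc))), rfl⟩)
    · exact Or.inr (Or.inr (Or.inl ⟨hc, rfl⟩))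
    · exact Or.inr (Or.inr (Or.inr ⟨Or.inl hc, rfl⟩))
    · exact Or.inr (Or.inr (Or.inr ⟨Or.inr (Or.inl hc), rfl⟩))
    · exact Or.inr (Or.inr (Or.inr ⟨Or.inr (Or.inr hc), rfl⟩))
  simp only [List.any_cons, List.any_nil, Bool.or_false, Bool.or_eq_true]
  by_cases g0 : (PySem.Str.isIn "anthropic" n = true ∨ PySem.Str.isIn "openai" n = true ∨ PySem.Str.isIn "hugging face" n = true)
  · have h0 : (0 : Nat) ∈ hits := by
      rcases g0 with h | h | h <;> exact mem_tok _ _ (by simp [pvTokenPriority]) h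
    rcases hm : PySem.List.min? hits (fun x => x) with _ | m
    · rw [(PySem.List.min?_eq_none_iff hits _).mp hm] at h0; simp at h0
    · have hle : m ≤ 0 := PySem.List.min?_isMin hm 0 h0
      have hm0 : m = 0 := Nat.le_zero.mp hle
      subst hm0
      rw [if_pos g0]; rfl
  · by_cases g1 : (PySem.Str.isIn "github" n = true ∨ PySem.Str.isIn "warp" n = true ∨ PySem.Str.isIn "linear" n = true ∨ PySem.Str.isIn "exafunction" n = true ∨ PySem.Str.isIn "windsurf" n = true)
    · have h1 : (1 : Nat) ∈ hits := by
        rcases g1 with h | h | h | h | h <;> exact mem_tok _ _ (by simp [pvTokenPriority]) h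
      rcases hm : PySem.List.min? hits (fun x => x) with _ | m
      · rw [(PySem.List.min?_eq_none_iff hits _).mp hm] at h1; simp at h1
      · have hle : m ≤ 1 := PySem.List.min?_isMin hm 1 h1
        have hm1 : m = 1 := by
          rcases hfwd m (PySem.List.min?_mem hm) with ⟨h, rfl⟩ | ⟨h, rfl⟩ | ⟨h, rfl⟩ | ⟨h, rfl⟩ <;>
            first | rfl | omega | exact absurd h g0
        subst hm1
        rw [if_neg g0, if_pos g1]; rfl
    · by_cases g2 : PySem.Str.isIn "zoom" n = true
      · have h2 : (2 : Nat) ∈ hits := mem_tok _ _ (by simp [pvTokenPriority]) g2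
        rcases hm : PySem.List.min? hits (fun x => x) with _ | m
        · rw [(PySem.List.min?_eq_none_iff hits _).mp hm] at h2; simp at h2
        · have hle : m ≤ 2 := PySem.List.min?_isMin hm 2 h2
          have hm2 : m = 2 := by
            rcases hfwd m (PySem.List.min?_mem hm) with ⟨h, rfl⟩ | ⟨h, rfl⟩ | ⟨h, rfl⟩ | ⟨h, rfl⟩ <;>
              first | rfl | omega | exact absurd h g0 | exact absurd h g1
          subst hm2
          rw [if_neg g0, if_neg g1, if_pos g2]; rfl
      · by_cases g3 : (PySem.Str.isIn "delta" n = true ∨ PySem.Str.isIn "united" n = true ∨ PySem.Str.isIn "alaska airlines" n = true)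
        · have h3 : (3 : Nat) ∈ hits := by
            rcases g3 with h | h | h <;> exact mem_tok _ _ (by simp [pvTokenPriority]) h
          rcases hm : PySem.List.min? hits (fun x => x) with _ | m
          · rw [(PySem.List.min?_eq_none_iff hits _).mp hm] at h3; simp at h3
          · have hm3 : m = 3 := by
              rcases hfwd m (PySem.List.min?_mem hm) with ⟨h, rfl⟩ | ⟨h, rfl⟩ | ⟨h, rfl⟩ | ⟨h, rfl⟩ <;>
                first | rfl | exact absurd h g0 | exact absurd h g1 | exact absurd h g2
            subst hm3
            rw [if_neg g0, if_neg g1, if_neg g2, if_pos g3]; rfl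
        · have hnil : hits = [] := by
            apply List.eq_nil_iff_forall_not_mem.mpr
            intro m hmm
            rcases hfwd m hmm with ⟨h, _⟩ | ⟨h, _⟩ | ⟨h, _⟩ | ⟨h, _⟩ <;> tauto
          rw [(PySem.List.min?_eq_none_iff hits _).mpr hnil]
          rw [if_neg g0, if_neg g1, if_neg g2, if_neg g3]

-- ===== VERDICT (by name: the statement is the Claim_ definition above) =====
theorem categorize_expense_vendor_spec : Claim_equal_categorize_expense_vendor := by
  intro vendor _
  unfold Spec_categorize_expense_vendor categorize_expense_vendor categorize_expense_vendor_alt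
  cases vendor with
  | none => rfl
  | some v =>
    by_cases hv : v = ""
    · simp [hv]
    · simp only [hv, if_false]
      exact (alt_body_eq_chain (PySem.Str.lower v)).symm
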